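-- pv_equiv track=rewrite | github.com/Mateusz2734/pdf-cli | functions/slicetools.py | invert_slices
-- ===== SOURCE A (Python) =====
-- def invert_slices(slices: str, page_count: int) -> str:
--     """
--     It takes a string of page numbers and page ranges, and returns a string of page numbers that are not
--     in the original string
--
--     :param slices: a string of comma-separated numbers and ranges of numbers, e.g. "1,3,5:7,9"
--     :type slices: str
--     :param page_count: the total number of pages in the document
--     :type page_count: int
--     :return: The pages that are not in the slices.
--     :type return: str
--     """
--     to_delete = []
--     for slice in slices.split(","):
--         if ":" in slice:
--             left = int(slice.split(":")[0])
--             right = int(slice.split(":")[1])+1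
--             [to_delete.append(str(num)) for num in
--                 range(left, right) if int(num) <= page_count]
--         else:
--             to_delete.append(slice)
--     pages = [str(i+1) for i in range(page_count)]
--     return ",".join(list(filter(lambda x: x not in to_delete, pages)))
-- ===== SOURCE B (Python) =====
-- def invert_slices(slices: str, page_count: int) -> str:
--     # Parse once: compact (left, right_exclusive) intervals for range tokens,
--     # a set of raw string tokens for single tokens; then one pass over pages.
--     intervals = []
--     singles = set()
--     for token in slices.split(","):
--         if ":" in token:
--             parts = token.split(":")
--             intervals.append((int(parts[0]), int(parts[1]) + 1))
--         else:
--             singles.add(token)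
--     kept = [str(p) for p in range(1, page_count + 1)
--             if str(p) not in singles
--             and not any(l <= p < r for (l, r) in intervals)]
--     return ",".join(kept)
-- ===== Notes on version B (the rewrite author's own statement) =====
-- stated objective: alternative
-- what changed: B parses the slice string once into compact (left, right+1) integer intervals plus a set of raw single tokens, then keeps each page 1..page_count by an interval-containment and set-membership test, instead of A's expanding every range into a flat string list of deleted pages that is scanned once per page.
import Mathlib
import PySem

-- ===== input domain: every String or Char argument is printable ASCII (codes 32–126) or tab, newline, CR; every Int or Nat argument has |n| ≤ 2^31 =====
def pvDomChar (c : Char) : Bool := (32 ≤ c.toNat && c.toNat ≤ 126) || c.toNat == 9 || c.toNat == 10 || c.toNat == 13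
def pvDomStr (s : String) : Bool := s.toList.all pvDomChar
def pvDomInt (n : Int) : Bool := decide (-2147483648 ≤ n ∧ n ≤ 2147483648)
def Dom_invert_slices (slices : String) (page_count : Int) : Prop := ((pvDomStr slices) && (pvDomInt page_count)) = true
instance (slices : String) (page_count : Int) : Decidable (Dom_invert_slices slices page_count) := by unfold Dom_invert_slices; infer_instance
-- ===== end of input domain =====

-- B parses the slice string once into compact integer intervals plus a set of raw single
-- tokens and keeps each page by a containment test, instead of expanding every range into
-- a flat string list that is scanned per page.

-- shared accessors for the parsing expressions both Pythons contain verbatim: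
-- int(slice.split(":")[0]) and int(slice.split(":")[1]) + 1; total via getD, exact under Pre_
-- (s.split(":") with the non-empty literal separator ":" is always some, so .getD [] is exact)
def pvLeft (tok : String) : Int :=
  (PySem.Int.ofStr? (PySem.List.pyGetD ((PySem.Str.split? tok ":").getD []) 0 "")).getD 0
def pvRight (tok : String) : Int :=
  (PySem.Int.ofStr? (PySem.List.pyGetD ((PySem.Str.split? tok ":").getD []) 1 "")).getD 0 + 1

-- ===== PORT A =====
def invert_slices (slices : String) (page_count : Int) : String :=
  let to_delete := ((PySem.Str.split? slices ",").getD []).foldl (fun td sl =>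
    if PySem.Str.isIn ":" sl then
      -- [to_delete.append(str(num)) for num in range(left, right) if int(num) <= page_count]
      td ++ ((PySem.List.pyRange (pvLeft sl) (pvRight sl) 1).filter
              (fun num => decide (num ≤ page_count))).map PySem.Int.toStr
    else
      td ++ [sl]) []
  let pages := (PySem.List.pyRange 0 page_count 1).map (fun i => PySem.Int.toStr (i + 1))
  PySem.Str.join "," (pages.filter (fun x => !(List.contains to_delete x)))

-- ===== PORT B =====
def invert_slices_alt (slices : String) (page_count : Int) : String :=
  let parsed := ((PySem.Str.split? slices ",").getD []).foldl
    (fun (acc : List (Int × Int) × PySem.Set String) token =>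
      if PySem.Str.isIn ":" token then
        (acc.1 ++ [(pvLeft token, pvRight token)], acc.2)
      else
        (acc.1, PySem.Set.add acc.2 token))
    ([], PySem.Set.empty)
  let kept := ((PySem.List.pyRange 1 (page_count + 1) 1).filter (fun p =>
      !(PySem.Set.contains parsed.2 (PySem.Int.toStr p))
      && !(parsed.1.any (fun lr => decide (lr.1 ≤ p) && decide (p < lr.2))))).map PySem.Int.toStr
  PySem.Str.join "," kept

-- ===== PRECONDITION & SPEC =====
-- Pre_ excludes exactly the inputs on which A raises ValueError: a comma token containing
-- ":" whose first or second ":"-part does not parse as a Python int.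
def Pre_invert_slices (slices : String) (page_count : Int) : Prop :=
  ∀ tok ∈ (PySem.Str.split? slices ",").getD [], PySem.Str.isIn ":" tok = true →
    (PySem.Int.ofStr? (PySem.List.pyGetD ((PySem.Str.split? tok ":").getD []) 0 "")).isSome = true ∧
    (PySem.Int.ofStr? (PySem.List.pyGetD ((PySem.Str.split? tok ":").getD []) 1 "")).isSome = true
instance (slices : String) (page_count : Int) : Decidable (Pre_invert_slices slices page_count) := by
  unfold Pre_invert_slices; infer_instance
def pvWitness_invert_slices : String × Int := ("1,3,5:7,9", 10)

def Spec_invert_slices (slices : String) (page_count : Int) (out : String) : Prop := out = invert_slices_alt slices page_count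
instance (slices : String) (page_count : Int) (out : String) : Decidable (Spec_invert_slices slices page_count out) := by unfold Spec_invert_slices; infer_instance

-- ===== CLAIM (what is proved, stated in full; the proofs are below) =====
def Claim_equal_invert_slices : Prop := ∀ (slices : String) (page_count : Int), Dom_invert_slices slices page_count → Pre_invert_slices slices page_count → Spec_invert_slices slices page_count (invert_slices slices page_count)

-- ===== LEMMAS AND PROOFS =====

-- str(n) is injective -----------------------------------------------------
lemma pvDigitChar_inj : ∀ a < 10, ∀ b < 10, Nat.digitChar a = Nat.digitChar b → a = b := by decide
lemma pvDigitChar_ne : ∀ a < 10, Nat.digitChar a ≠ '-' := by decide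

lemma pvCore_eq (n : Nat) : ∀ (f : Nat) (ds : List Char), n < f →
    Nat.toDigitsCore 10 f n ds = Nat.toDigits 10 n ++ ds := by
  induction n using Nat.strong_induction_on with
  | _ n ih =>
    intro f ds hf
    match f, hf with
    | f+1, hf =>
      rw [Nat.toDigits]
      by_cases h : n / 10 = 0
      · simp [Nat.toDigitsCore, h]
      · have hlt : n / 10 < n := Nat.div_lt_self (by omega) (by omega)
        simp only [Nat.toDigitsCore, h]
        rw [ih (n/10) hlt f (Nat.digitChar (n % 10) :: ds) (by omega),
            ih (n/10) hlt n ([Nat.digitChar (n % 10)]) (by omega)]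
        simp

lemma pvToDigits_small {n : Nat} (h : n < 10) : Nat.toDigits 10 n = [Nat.digitChar n] := by
  rw [Nat.toDigits]
  simp [Nat.toDigitsCore, Nat.div_eq_of_lt h, Nat.mod_eq_of_lt h]

lemma pvToDigits_step {n : Nat} (h : 10 ≤ n) :
    Nat.toDigits 10 n = Nat.toDigits 10 (n/10) ++ [Nat.digitChar (n%10)] := by
  rw [Nat.toDigits]
  have h0 : ¬ n / 10 = 0 := by omega
  simp only [Nat.toDigitsCore, h0, if_false]
  exact pvCore_eq (n/10) n [Nat.digitChar (n % 10)] (by omega)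

lemma pvToDigits_ne_nil (n : Nat) : Nat.toDigits 10 n ≠ [] := by
  by_cases h : n < 10
  · simp [pvToDigits_small h]
  · simp [pvToDigits_step (by omega : 10 ≤ n)]

lemma pvNotMem_neg (n : Nat) : '-' ∉ Nat.toDigits 10 n := by
  induction n using Nat.strong_induction_on with
  | _ n ih =>
    by_cases h : n < 10
    · simp [pvToDigits_small h]
      exact fun hc => pvDigitChar_ne n h hc.symm
    · rw [pvToDigits_step (by omega : 10 ≤ n)]
      intro hc
      rcases List.mem_append.mp hc with hc | hc
      · exact ih (n/10) (Nat.div_lt_self (by omega) (by omega)) hc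
      · rcases List.mem_singleton.mp hc with h'
        exact pvDigitChar_ne (n % 10) (by omega) h'.symm

lemma pvToDigits_inj (m : Nat) : ∀ n, Nat.toDigits 10 m = Nat.toDigits 10 n → m = n := by
  induction m using Nat.strong_induction_on with
  | _ m ih =>
    intro n heq
    by_cases hm : m < 10 <;> by_cases hn : n < 10
    · rw [pvToDigits_small hm, pvToDigits_small hn] at heq
      exact pvDigitChar_inj m hm n hn (List.singleton_inj.mp heq)
    · rw [pvToDigits_small hm, pvToDigits_step (by omega : 10 ≤ n)] at heq
      have hlen := congrArg List.length heq
      have := pvToDigits_ne_nil (n/10)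
      cases h' : Nat.toDigits 10 (n/10) with
      | nil => exact absurd h' this
      | cons a l => rw [h'] at hlen; simp at hlen
    · rw [pvToDigits_small hn, pvToDigits_step (by omega : 10 ≤ m)] at heq
      have hlen := congrArg List.length heq
      have := pvToDigits_ne_nil (m/10)
      cases h' : Nat.toDigits 10 (m/10) with
      | nil => exact absurd h' this
      | cons a l => rw [h'] at hlen; simp at hlen
    · rw [pvToDigits_step (by omega : 10 ≤ m), pvToDigits_step (by omega : 10 ≤ n)] at heq
      have h2 := List.append_inj' heq (by simp)
      have hd : m / 10 = n / 10 := ih (m/10) (Nat.div_lt_self (by omega) (by omega)) (n/10) h2.1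
      have hr : m % 10 = n % 10 :=
        pvDigitChar_inj (m % 10) (by omega) (n % 10) (by omega) (List.singleton_inj.mp h2.2)
      omega

lemma pvToChars_inj {a b : Int} (h : PySem.Int.toChars a = PySem.Int.toChars b) : a = b := by
  unfold PySem.Int.toChars at h
  by_cases ha : a < 0 <;> by_cases hb : b < 0 <;> simp [ha, hb] at h
  · have := pvToDigits_inj a.natAbs b.natAbs h
    omega
  · exact absurd (h ▸ List.mem_cons_self) (pvNotMem_neg b.toNat)
  · exact absurd (h.symm ▸ List.mem_cons_self) (pvNotMem_neg a.toNat)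
  · have := pvToDigits_inj a.toNat b.toNat h
    omega

lemma pvToStr_inj {a b : Int} (h : PySem.Int.toStr a = PySem.Int.toStr b) : a = b := by
  apply pvToChars_inj
  rw [← PySem.Int.toList_toStr, ← PySem.Int.toList_toStr, h]

-- A's to_delete as a flatMap ----------------------------------------------
def pvRangeStrs (pc : Int) (sl : String) : List String :=
  ((PySem.List.pyRange (pvLeft sl) (pvRight sl) 1).filter
    (fun num => decide (num ≤ pc))).map PySem.Int.toStr

def pvG (pc : Int) (sl : String) : List String :=
  if PySem.Str.isIn ":" sl then pvRangeStrs pc sl else [sl]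

lemma pvG_pos (pc : Int) {sl : String} (h : PySem.Str.isIn ":" sl = true) :
    pvG pc sl = pvRangeStrs pc sl := by
  unfold pvG; exact if_pos h

lemma pvG_neg (pc : Int) {sl : String} (h : ¬ PySem.Str.isIn ":" sl = true) :
    pvG pc sl = [sl] := by
  unfold pvG; exact if_neg h

lemma pvDelFold (pc : Int) : ∀ (ts td : List String),
    ts.foldl (fun td sl =>
      if PySem.Str.isIn ":" sl then
        td ++ ((PySem.List.pyRange (pvLeft sl) (pvRight sl) 1).filter
                (fun num => decide (num ≤ pc))).map PySem.Int.toStr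
      else td ++ [sl]) td
    = td ++ ts.flatMap (pvG pc) := by
  intro ts
  induction ts with
  | nil => intro td; simp
  | cons t ts ih =>
    intro td
    by_cases h : PySem.Str.isIn ":" t = true
    · rw [List.foldl_cons, if_pos h, ih, List.flatMap_cons, pvG_pos pc h,
        List.append_assoc]
      rfl
    · rw [List.foldl_cons, if_neg h, ih, List.flatMap_cons, pvG_neg pc h,
        List.append_assoc]

-- B's parse fold -----------------------------------------------------------
def pvStep : List (Int × Int) × PySem.Set String → String → List (Int × Int) × PySem.Set String :=
  fun acc token =>
    if PySem.Str.isIn ":" token then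
      (acc.1 ++ [(pvLeft token, pvRight token)], acc.2)
    else
      (acc.1, PySem.Set.add acc.2 token)

lemma pvStep_pos (acc : List (Int × Int) × PySem.Set String) {t : String}
    (h : PySem.Str.isIn ":" t = true) :
    pvStep acc t = (acc.1 ++ [(pvLeft t, pvRight t)], acc.2) := by
  unfold pvStep; exact if_pos h

lemma pvStep_neg (acc : List (Int × Int) × PySem.Set String) {t : String}
    (h : ¬ PySem.Str.isIn ":" t = true) :
    pvStep acc t = (acc.1, PySem.Set.add acc.2 t) := by
  unfold pvStep; exact if_neg h

lemma pvParse_fst : ∀ (ts : List String) (acc : List (Int × Int) × PySem.Set String),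
    (ts.foldl pvStep acc).1
    = acc.1 ++ (ts.filter (fun t => PySem.Str.isIn ":" t)).map (fun t => (pvLeft t, pvRight t)) := by
  intro ts
  induction ts with
  | nil => intro acc; simp
  | cons t ts ih =>
    intro acc
    by_cases h : PySem.Str.isIn ":" t = true
    · rw [List.foldl_cons, pvStep_pos acc h, ih, List.filter_cons_of_pos h,
        List.map_cons, List.append_assoc]
      rfl
    · rw [List.foldl_cons, pvStep_neg acc h, ih,
        List.filter_cons_of_neg (by simpa using h)]

lemma pvParse_snd : ∀ (ts : List String) (acc : List (Int × Int) × PySem.Set String) (x : String),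
    x ∈ (ts.foldl pvStep acc).2 ↔ x ∈ acc.2 ∨ (x ∈ ts ∧ PySem.Str.isIn ":" x = false) := by
  intro ts
  induction ts with
  | nil => intro acc x; simp
  | cons t ts ih =>
    intro acc x
    by_cases h : PySem.Str.isIn ":" t = true
    · rw [List.foldl_cons, pvStep_pos acc h, ih]
      constructor
      · rintro (hx | ⟨hx, hc⟩)
        · exact Or.inl hx
        · exact Or.inr ⟨List.mem_cons_of_mem t hx, hc⟩
      · rintro (hx | ⟨hx, hc⟩)
        · exact Or.inl hx
        · rcases List.mem_cons.mp hx with rfl | hx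
          · rw [h] at hc; exact Bool.noConfusion hc
          · exact Or.inr ⟨hx, hc⟩
    · rw [List.foldl_cons, pvStep_neg acc h, ih]
      have hf : PySem.Str.isIn ":" t = false := by simpa using h
      constructor
      · rintro (hx | ⟨hx, hc⟩)
        · rcases (PySem.Set.mem_add acc.2 t x).mp hx with hx | rfl
          · exact Or.inl hx
          · exact Or.inr ⟨List.mem_cons_self, hf⟩
        · exact Or.inr ⟨List.mem_cons_of_mem t hx, hc⟩
      · rintro (hx | ⟨hx, hc⟩)
        · exact Or.inl ((PySem.Set.mem_add acc.2 t x).mpr (Or.inl hx))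
        · rcases List.mem_cons.mp hx with rfl | hx
          · exact Or.inl ((PySem.Set.mem_add acc.2 x x).mpr (Or.inr rfl))
          · exact Or.inr ⟨hx, hc⟩

-- the pages list of A is pyRange 1 (pc+1) mapped through str ---------------
lemma pvPages (pc : Int) :
    (PySem.List.pyRange 0 pc 1).map (fun i => PySem.Int.toStr (i + 1))
    = (PySem.List.pyRange 1 (pc + 1) 1).map PySem.Int.toStr := by
  rw [PySem.List.pyRange_one, PySem.List.pyRange_one]
  have h : pc - 0 = pc + 1 - 1 := by ring
  rw [h, List.map_map, List.map_map]
  apply List.map_congr_left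
  intro a _
  simp only [Function.comp_apply]
  congr 1
  omega

-- membership of str(p) in an expanded range token --------------------------
lemma pvMemRange (pc p : Int) (hp : p ≤ pc) (sl : String) :
    PySem.Int.toStr p ∈ pvRangeStrs pc sl ↔ pvLeft sl ≤ p ∧ p < pvRight sl := by
  unfold pvRangeStrs
  simp only [List.mem_map, List.mem_filter, PySem.List.mem_pyRange_one, decide_eq_true_eq]
  constructor
  · rintro ⟨num, ⟨⟨ha, hb⟩, _⟩, heq⟩
    have := pvToStr_inj heq
    subst this
    exact ⟨ha, hb⟩
  · rintro ⟨ha, hb⟩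
    exact ⟨p, ⟨⟨ha, hb⟩, hp⟩, rfl⟩

set_option maxHeartbeats 1000000 in
-- pointwise equality of the two keep-predicates ---------------------------
lemma pvPointwise (pc p : Int) (ts : List String) (hp2 : p < pc + 1) :
    (!(List.contains (ts.flatMap (pvG pc)) (PySem.Int.toStr p)))
    = (!(PySem.Set.contains (ts.foldl pvStep ([], PySem.Set.empty)).2 (PySem.Int.toStr p))
       && !((ts.foldl pvStep ([], PySem.Set.empty)).1.any
            (fun lr => decide (lr.1 ≤ p) && decide (p < lr.2)))) := by
  have hple : p ≤ pc := by omega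
  rw [← Bool.not_or]
  congr 1
  rw [Bool.eq_iff_iff]
  simp only [List.contains_iff_mem, List.mem_flatMap, Bool.or_eq_true,
    PySem.Set.contains_iff, pvParse_snd, pvParse_fst, List.any_eq_true, List.mem_map,
    List.mem_filter, List.nil_append, Bool.and_eq_true, decide_eq_true_eq]
  constructor
  · rintro ⟨sl, hsl, hmem⟩
    by_cases hc : PySem.Str.isIn ":" sl = true
    · right
      rw [pvG_pos pc hc] at hmem
      rcases (pvMemRange pc p hple sl).mp hmem with ⟨ha, hb⟩
      exact ⟨(pvLeft sl, pvRight sl), ⟨sl, ⟨hsl, hc⟩, rfl⟩, ha, hb⟩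
    · left
      rw [pvG_neg pc hc] at hmem
      rcases List.mem_singleton.mp hmem with rfl
      exact Or.inr ⟨hsl, by simpa using hc⟩
  · rintro ((hx | ⟨hmem, hc⟩) | ⟨⟨l, r⟩, ⟨sl, ⟨hsl, hcol⟩, hparse⟩, ha, hb⟩)
    · exact absurd hx (by simp [PySem.Set.empty])
    · exact ⟨PySem.Int.toStr p, hmem, by rw [pvG_neg pc (by intro hh; rw [hc] at hh; exact Bool.noConfusion hh)]; exact List.mem_singleton.mpr rfl⟩
    · refine ⟨sl, hsl, ?_⟩
      rw [pvG_pos pc hcol]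
      apply (pvMemRange pc p hple sl).mpr
      have h1 : pvLeft sl = l := congrArg Prod.fst hparse
      have h2 : pvRight sl = r := congrArg Prod.snd hparse
      rw [h1, h2]
      exact ⟨ha, hb⟩

set_option maxHeartbeats 1000000 in
-- the core equality, over an arbitrary token list --------------------------
lemma pvCoreEq (pc : Int) (ts : List String) :
    PySem.Str.join ","
      (((PySem.List.pyRange 0 pc 1).map (fun i => PySem.Int.toStr (i + 1))).filter
        (fun x => !(List.contains (ts.flatMap (pvG pc)) x)))
    = PySem.Str.join ","
        (((PySem.List.pyRange 1 (pc + 1) 1).filter (fun p =>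
            !(PySem.Set.contains (ts.foldl pvStep ([], PySem.Set.empty)).2 (PySem.Int.toStr p))
            && !((ts.foldl pvStep ([], PySem.Set.empty)).1.any
                 (fun lr => decide (lr.1 ≤ p) && decide (p < lr.2))))).map PySem.Int.toStr) := by
  congr 1
  rw [pvPages, List.filter_map]
  congr 1
  apply List.filter_congr
  intro p hp
  rcases PySem.List.mem_pyRange_one.mp hp with ⟨-, h2⟩
  simp only [Function.comp_apply]
  exact pvPointwise pc p ts h2

set_option maxHeartbeats 1000000 in
-- ===== VERDICT (by name: the statement is the Claim_ definition above) =====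
theorem invert_slices_spec : Claim_equal_invert_slices := by
  intro slices page_count _hdom _hpre
  unfold Spec_invert_slices
  have hA : invert_slices slices page_count
      = PySem.Str.join ","
          (((PySem.List.pyRange 0 page_count 1).map (fun i => PySem.Int.toStr (i + 1))).filter
            (fun x => !(List.contains
              (((PySem.Str.split? slices ",").getD []).flatMap (pvG page_count)) x))) := by
    have h := pvDelFold page_count ((PySem.Str.split? slices ",").getD []) []
    calc invert_slices slices page_count
        = PySem.Str.join ","
            (((PySem.List.pyRange 0 page_count 1).map (fun i => PySem.Int.toStr (i + 1))).filter
              (fun x => !(List.contains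
                (((PySem.Str.split? slices ",").getD []).foldl (fun td sl =>
                  if PySem.Str.isIn ":" sl then
                    td ++ ((PySem.List.pyRange (pvLeft sl) (pvRight sl) 1).filter
                            (fun num => decide (num ≤ page_count))).map PySem.Int.toStr
                  else td ++ [sl]) []) x))) := rfl
      _ = _ := by rw [h, List.nil_append]
  have hB : invert_slices_alt slices page_count
      = PySem.Str.join ","
          (((PySem.List.pyRange 1 (page_count + 1) 1).filter (fun p =>
              !(PySem.Set.contains
                  (((PySem.Str.split? slices ",").getD []).foldl pvStep ([], PySem.Set.empty)).2
                  (PySem.Int.toStr p))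
              && !((((PySem.Str.split? slices ",").getD []).foldl pvStep ([], PySem.Set.empty)).1.any
                   (fun lr => decide (lr.1 ≤ p) && decide (p < lr.2))))).map PySem.Int.toStr) := rfl
  rw [hA, hB]
  exact pvCoreEq page_count ((PySem.Str.split? slices ",").getD [])
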